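-- pv_equiv track=rewrite | github.com/whoissboy/Karpovrep | PZ13/pz13_2.py | sum_of_second_half
-- ===== SOURCE A (Python) =====
-- def sum_of_second_half(matrix):
--     total_sum = 0
--     total_elements = len(matrix) * len(matrix[0])
--     half_index = total_elements // 2
--
--     # Пробегаем по всем элементам матрицы и суммируем элементы второй половины
--     for i in range(len(matrix)):
--         for j in range(len(matrix[i])):
--             if i * len(matrix[i]) + j >= half_index:
--                 total_sum += matrix[i][j]
--
--     return total_sum
-- ===== SOURCE B (Python) =====
-- def sum_of_second_half(matrix):
--     half = len(matrix) * len(matrix[0]) // 2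
--     total = 0
--     for i, row in enumerate(matrix):
--         li = len(row)
--         start = max(0, min(li, half - i * li))
--         total += sum(row[start:])
--     return total
-- ===== Notes on version B (the rewrite author's own statement) =====
-- stated objective: faster
-- what changed: Replaces A's per-element flat-index test inside a nested loop with a single pass over rows that computes a clamped start offset per row and sums the slice row[start:], keeping base = i*len(row) so ragged matrices match A exactly.
import Mathlib
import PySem

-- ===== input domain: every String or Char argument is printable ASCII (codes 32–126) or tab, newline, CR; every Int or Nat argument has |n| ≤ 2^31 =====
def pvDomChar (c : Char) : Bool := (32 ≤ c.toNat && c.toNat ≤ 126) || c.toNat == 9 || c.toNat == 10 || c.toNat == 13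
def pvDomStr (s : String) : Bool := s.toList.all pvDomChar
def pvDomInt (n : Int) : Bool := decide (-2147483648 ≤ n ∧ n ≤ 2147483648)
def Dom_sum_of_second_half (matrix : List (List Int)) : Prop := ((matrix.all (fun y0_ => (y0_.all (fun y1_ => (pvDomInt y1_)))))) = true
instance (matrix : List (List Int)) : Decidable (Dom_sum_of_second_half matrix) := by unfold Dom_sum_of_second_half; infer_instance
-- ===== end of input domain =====

-- B replaces A's per-element flat-index test (nested loops) with one pass over rows:
-- a clamped start offset per row plus a slice sum (measured constant-factor speedup; slice+sum avoids per-element index arithmetic).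

-- ===== PORT A =====
def sum_of_second_half (matrix : List (List Int)) : Int :=
  let totalElements : Int := (matrix.length : Int) * ((matrix.headD []).length : Int)
  let halfIndex : Int := PySem.Int.floordiv totalElements 2
  (PySem.List.pyRange 0 (matrix.length : Int) 1).foldl (fun totalSum i =>
    let row := PySem.List.pyGetD matrix i []
    (PySem.List.pyRange 0 (row.length : Int) 1).foldl (fun t j =>
      if i * (row.length : Int) + j ≥ halfIndex then t + PySem.List.pyGetD row j 0 else t)
      totalSum) 0

-- ===== PORT B =====
def sum_of_second_half_alt (matrix : List (List Int)) : Int :=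
  let half : Int := PySem.Int.floordiv ((matrix.length : Int) * ((matrix.headD []).length : Int)) 2
  (PySem.List.enumerate matrix 0).foldl (fun total p =>
    let li : Int := p.2.length
    let start : Int := max 0 (min li (half - p.1 * li))
    total + (PySem.List.slice p.2 (some start) none).sum) 0

-- ===== PRECONDITION & SPEC =====
-- Pre_ excludes only the empty matrix, on which A raises IndexError at matrix[0].
def Pre_sum_of_second_half (matrix : List (List Int)) : Prop := matrix ≠ []
instance (matrix : List (List Int)) : Decidable (Pre_sum_of_second_half matrix) := by unfold Pre_sum_of_second_half; infer_instance
def pvWitness_sum_of_second_half : List (List Int) := [[1, 2], [3, 4]]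
def Spec_sum_of_second_half (matrix : List (List Int)) (out : Int) : Prop := out = sum_of_second_half_alt matrix
instance (matrix : List (List Int)) (out : Int) : Decidable (Spec_sum_of_second_half matrix out) := by unfold Spec_sum_of_second_half; infer_instance

-- ===== CLAIM (what is proved, stated in full; the proofs are below) =====
def Claim_equal_sum_of_second_half : Prop := ∀ (matrix : List (List Int)), Dom_sum_of_second_half matrix → Pre_sum_of_second_half matrix → Spec_sum_of_second_half matrix (sum_of_second_half matrix)

-- ===== LEMMAS AND PROOFS =====

-- the value both programs add for the row at absolute index i, given the half threshold h
def pvRowSum (h : Int) (i : Int) (row : List Int) : Int :=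
  (row.drop (min row.length (h - i * (row.length : Int)).toNat)).sum

def pvSum (h : Int) : Int → List (List Int) → Int
  | _, [] => 0
  | i, row :: rest => pvRowSum h i row + pvSum h (i + 1) rest

-- inner loop of A for one row: the conditional foldl over column indices is the sum of the dropped suffix
lemma inner_eq (row : List Int) (c acc : Int) :
    (List.range row.length).foldl
      (fun t (j : Nat) => if c ≤ (j : Int) then t + row.getD j 0 else t) acc
    = acc + (row.drop (min row.length c.toNat)).sum := by
  induction row generalizing c acc with
  | nil => simp
  | cons x rest ih =>
    simp only [List.length_cons]
    rw [List.range_succ_eq_map, List.foldl_cons, List.foldl_map]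
    have step : ∀ (t : Int) (j : Nat),
        (if c ≤ ((j.succ : Nat) : Int) then t + (x :: rest).getD j.succ 0 else t)
        = (if c - 1 ≤ (j : Int) then t + rest.getD j 0 else t) := by
      intro t j
      have : (c ≤ ((j.succ : Nat) : Int)) = (c - 1 ≤ (j : Int)) := by
        simp only [eq_iff_iff]; push_cast; omega
      simp [this]
    calc (List.range rest.length).foldl
          (fun t j => if c ≤ ((j.succ : Nat) : Int) then t + (x :: rest).getD j.succ 0 else t)
          (if c ≤ ((0 : Nat) : Int) then acc + (x :: rest).getD 0 0 else acc)
        = (List.range rest.length).foldl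
          (fun t (j : Nat) => if c - 1 ≤ (j : Int) then t + rest.getD j 0 else t)
          (if c ≤ 0 then acc + x else acc) := by
          simp only [step]; norm_num
      _ = acc + ((x :: rest).drop (min (x :: rest).length c.toNat)).sum := by
          rw [ih]
          by_cases hc : c ≤ 0
          · have h1 : c.toNat = 0 := by omega
            have h2 : (c - 1).toNat = 0 := by omega
            simp [hc, h1, h2]; ring
          · have h1 : min (x :: rest).length c.toNat = min rest.length (c - 1).toNat + 1 := by
              simp [List.length_cons]; omega
            simp only [hc]
            rw [h1, List.drop_succ_cons]
            simp

-- A's outer loop equals acc + pvSum, for any starting row index k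
lemma outerA_eq (mats : List (List Int)) (h acc k : Int) (hk : 0 ≤ k) :
    (PySem.List.pyRange k (k + (mats.length : Int)) 1).foldl (fun totalSum i =>
      let row := PySem.List.pyGetD mats (i - k) []
      (PySem.List.pyRange 0 (row.length : Int) 1).foldl (fun t j =>
        if i * (row.length : Int) + j ≥ h then t + PySem.List.pyGetD row j 0 else t)
        totalSum) acc
    = acc + pvSum h k mats := by
  induction mats generalizing acc k with
  | nil => simp [pvSum, PySem.List.pyRange_one_eq_nil]
  | cons row rest ih =>
    rw [PySem.List.pyRange_one_cons (by push_cast [List.length_cons]; omega), List.foldl_cons]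
    have hshift : ∀ i : Int, k + 1 ≤ i →
        PySem.List.pyGetD (row :: rest) (i - k) ([] : List Int)
        = PySem.List.pyGetD rest (i - (k + 1)) [] := by
      intro i hi
      have h1 : i - k = ((i - k).toNat : Int) := by omega
      have h2 : i - (k + 1) = ((i - (k + 1)).toNat : Int) := by omega
      have h3 : (i - k).toNat = (i - (k + 1)).toNat + 1 := by omega
      rw [h1, h2, h3, PySem.List.pyGetD_natCast, PySem.List.pyGetD_natCast,
        List.getD_cons_succ]
    have congr1 : ∀ init : Int, (PySem.List.pyRange (k + 1) (k + (((row :: rest).length : Nat) : Int)) 1).foldl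
        (fun totalSum i =>
          let r := PySem.List.pyGetD (row :: rest) (i - k) ([] : List Int)
          (PySem.List.pyRange 0 (r.length : Int) 1).foldl (fun t j =>
            if i * (r.length : Int) + j ≥ h then t + PySem.List.pyGetD r j 0 else t) totalSum)
        init
        = (PySem.List.pyRange (k + 1) ((k + 1) + (rest.length : Int)) 1).foldl
        (fun totalSum i =>
          let r := PySem.List.pyGetD rest (i - (k + 1)) ([] : List Int)
          (PySem.List.pyRange 0 (r.length : Int) 1).foldl (fun t j =>
            if i * (r.length : Int) + j ≥ h then t + PySem.List.pyGetD r j 0 else t) totalSum)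
        init := by
      intro init
      have hb : k + (((row :: rest).length : Nat) : Int) = (k + 1) + (rest.length : Int) := by
        push_cast [List.length_cons]; ring
      rw [hb]
      apply PySem.List.foldl_congr_mem
      intro t i hi
      rw [PySem.List.mem_pyRange_one] at hi
      simp only [hshift i hi.1]
    rw [congr1, ih _ (k + 1) (by omega)]
    -- first row: reduce A's inner loop via inner_eq
    have hrow : PySem.List.pyGetD (row :: rest) (k - k) ([] : List Int) = row := by
      simp
    simp only [sub_self] at hrow
    have hfirst : (PySem.List.pyRange 0 ((PySem.List.pyGetD (row :: rest) (k - k) ([] : List Int)).length : Int) 1).foldl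
        (fun t j => if k * ((PySem.List.pyGetD (row :: rest) (k - k) ([] : List Int)).length : Int) + j ≥ h
          then t + PySem.List.pyGetD (PySem.List.pyGetD (row :: rest) (k - k) ([] : List Int)) j 0 else t) acc
        = acc + pvRowSum h k row := by
      simp only [sub_self, hrow]
      rw [PySem.List.pyRange_zero_nat]
      rw [List.foldl_map]
      have hgj : ∀ (t : Int) (j : Nat),
          (if k * (row.length : Int) + ((j : Nat) : Int) ≥ h then t + PySem.List.pyGetD row ((j : Nat) : Int) 0 else t)
          = (if h - k * (row.length : Int) ≤ (j : Int) then (t + row.getD j 0 : Int) else t) := by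
        intro t j
        rw [PySem.List.pyGetD_natCast]
        by_cases hcond : k * (row.length : Int) + (j : Int) ≥ h
        · rw [if_pos hcond, if_pos (by omega)]
        · rw [if_neg hcond, if_neg (by omega)]
      simp only [hgj]
      rw [inner_eq]
      rfl
    simp only [hfirst]
    simp [pvSum]; ring
-- B's fold equals acc + pvSum
lemma outerB_eq (mats : List (List Int)) (h acc k : Int) :
    (PySem.List.enumerate mats k).foldl (fun total p =>
      let li : Int := p.2.length
      let start : Int := max 0 (min li (h - p.1 * li))
      total + (PySem.List.slice p.2 (some start) none).sum) acc
    = acc + pvSum h k mats := by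
  induction mats generalizing acc k with
  | nil => simp [pvSum, PySem.List.enumerate_nil]
  | cons row rest ih =>
    rw [PySem.List.enumerate_cons, List.foldl_cons, ih]
    have hs : PySem.List.slice row (some (max 0 (min (row.length : Int) (h - k * (row.length : Int))))) none
        = row.drop (min row.length (h - k * (row.length : Int)).toNat) := by
      rw [PySem.List.slice_from row (le_max_left 0 _)]
      congr 1
      omega
    simp only [hs]
    simp [pvRowSum, pvSum]; ring

-- ===== VERDICT (by name: the statement is the Claim_ definition above) =====
theorem sum_of_second_half_spec : Claim_equal_sum_of_second_half := by
  intro matrix _ _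
  unfold Spec_sum_of_second_half sum_of_second_half sum_of_second_half_alt
  set h := PySem.Int.floordiv ((matrix.length : Int) * ((matrix.headD []).length : Int)) 2 with hh
  have hA := outerA_eq matrix h 0 0 le_rfl
  simp only [zero_add, sub_zero] at hA
  rw [hA, outerB_eq]
  ring
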